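-- pv_equiv track=rewrite | github.com/Sartman34/XML-Beautifier-Bannerlord | MainApp Source/main.py | raw_line
-- ===== SOURCE A (Python) =====
-- def raw_line(line):
--     while " "*2 in line:
--         line = line.replace(" "*2, " ")
--     to_strip = ["<", ">", "=", "?", "!", "/"]
--     stripped_line = []
--     part = ""
--     for char in line:
--         if char in to_strip:
--             stripped_line.extend([part.strip(" "), char])
--             part = ""
--         else:
--             part += char
--     stripped_line.append(part.strip(" "))
--     line = "".join(stripped_line)
--     return line
-- ===== SOURCE B (Python) =====
-- def raw_line(line):
--     delims = "<>=?!/"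
--     out = []
--     pending = False      # an unemitted run of spaces
--     boundary = True      # at string start or just after a delimiter
--     for ch in line:
--         if ch == " ":
--             pending = True
--         elif ch in delims:
--             out.append(ch)
--             pending = False
--             boundary = True
--         else:
--             if pending and not boundary:
--                 out.append(" ")
--             out.append(ch)
--             pending = False
--             boundary = False
--     return "".join(out)
-- ===== Notes on version B (the rewrite author's own statement) =====
-- stated objective: faster
-- what changed: B fuses A's repeated whole-string double-space-collapsing replace passes plus its split-into-parts/strip/rejoin pass into one single character scan keeping only a pending-space flag and an at-boundary flag.
import Mathlib
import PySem

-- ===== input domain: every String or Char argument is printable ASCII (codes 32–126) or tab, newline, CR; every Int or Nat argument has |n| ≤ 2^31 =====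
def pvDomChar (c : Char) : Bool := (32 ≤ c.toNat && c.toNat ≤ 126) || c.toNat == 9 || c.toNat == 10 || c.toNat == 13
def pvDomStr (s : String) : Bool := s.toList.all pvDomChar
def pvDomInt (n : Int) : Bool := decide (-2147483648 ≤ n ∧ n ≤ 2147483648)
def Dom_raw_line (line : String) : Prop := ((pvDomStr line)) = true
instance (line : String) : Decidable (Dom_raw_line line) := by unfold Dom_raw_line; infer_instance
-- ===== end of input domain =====

-- B fuses A's two passes (collapse space runs, then strip spaces around delimiters) into one
-- character scan with a pending-space flag and a boundary flag; return values proved equal.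

-- ===== PORT A =====
-- helper needed by the port's termination proof: one Python pass of
-- line.replace("  ", " ") characterized as a structural recursion, so that
-- we can show each loop iteration strictly shrinks the string.
def rep2 : List Char → List Char
  | ' ' :: ' ' :: t => ' ' :: rep2 t
  | c :: t => c :: rep2 t
  | [] => []

theorem rep2_cons (c : Char) (t : List Char) (h : ¬(c = ' ' ∧ t.head? = some ' ')) :
    rep2 (c :: t) = c :: rep2 t := by
  rw [rep2.eq_def]
  split <;> simp_all

theorem replace_go_eq_rep2 (fuel : Nat) (l acc : List Char) (h : l.length ≤ fuel) :
    PySem.Chars.replace.go [' ', ' '] [' '] fuel l acc = acc.reverse ++ rep2 l := by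
  induction fuel generalizing l acc with
  | zero =>
    cases l with
    | nil => simp [PySem.Chars.replace.go, rep2]
    | cons c t => simp at h
  | succ n ih =>
    match l with
    | [] => simp [PySem.Chars.replace.go, rep2]
    | c :: t =>
      by_cases hp : List.isPrefixOf [' ', ' '] (c :: t) = true
      · obtain ⟨t2, rfl, rfl⟩ :
            ∃ t2, c = ' ' ∧ t = ' ' :: t2 := by
          cases t with
          | nil => simp [List.isPrefixOf] at hp
          | cons c2 t2 =>
            simp [List.isPrefixOf] at hp
            exact ⟨t2, hp.1.symm, by rw [← hp.2]⟩
        rw [PySem.Chars.replace.go]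
        simp only [hp, if_pos]
        rw [ih _ _ (by simp at h ⊢; omega)]
        simp [rep2]
      · rw [PySem.Chars.replace.go]
        simp only [hp, Bool.false_eq_true, if_false]
        rw [ih t (c :: acc) (by simp only [List.length_cons] at h; omega)]
        rw [rep2_cons c t (by
          rintro ⟨h1, h2⟩
          cases t with
          | nil => simp at h2
          | cons c2 t2 =>
            simp at h2
            subst h1 h2
            simp [List.isPrefixOf] at hp)]
        simp

theorem replace_eq_rep2 (l : List Char) :
    PySem.Chars.replace l [' ', ' '] [' '] = rep2 l := by
  simp [PySem.Chars.replace]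
  exact replace_go_eq_rep2 l.length l [] le_rfl

-- "  " in l, as a structural recursion
def hasDD : List Char → Bool
  | a :: b :: t => (a == ' ' && b == ' ') || hasDD (b :: t)
  | _ => false

theorem infix_dd_cons (c : Char) (t : List Char) (hd : ¬(c = ' ' ∧ t.head? = some ' ')) :
    ([' ', ' '] <:+: c :: t) ↔ ([' ', ' '] <:+: t) := by
  constructor
  · intro hinf
    rcases List.infix_cons_iff.mp hinf with hpre | hinf2
    · rcases hpre with ⟨u, hu⟩
      simp at hu
      exact absurd ⟨hu.1.symm, by rw [← hu.2]; rfl⟩ hd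
    · exact hinf2
  · exact List.infix_cons

theorem isIn_eq_hasDD (l : List Char) : PySem.Chars.isIn [' ', ' '] l = hasDD l := by
  induction l with
  | nil =>
    simp only [hasDD]
    rw [PySem.Chars.isIn_eq_false_iff]
    intro hinf
    have := hinf.length_le; simp at this
  | cons c t ih =>
    by_cases hd : c = ' ' ∧ t.head? = some ' '
    · obtain ⟨rfl, hh⟩ := hd
      cases t with
      | nil => simp at hh
      | cons c2 t2 =>
        simp at hh; subst hh
        rw [show hasDD (' ' :: ' ' :: t2) = true by simp [hasDD]]
        rw [PySem.Chars.isIn_iff_infix]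
        exact List.infix_cons_iff.mpr (Or.inl ⟨t2, rfl⟩)
    · have hstep : hasDD (c :: t) = hasDD t := by
        cases t with
        | nil => simp [hasDD]
        | cons c2 t2 =>
          have h2 : ¬(c = ' ' ∧ c2 = ' ') := by
            rintro ⟨a, b⟩; exact hd ⟨a, by simp [b]⟩
          rcases Decidable.not_and_iff_not_or_not.mp h2 with h1 | h1 <;> simp [hasDD, h1]
      rw [hstep, ← ih]
      cases hb : PySem.Chars.isIn [' ', ' '] t
      · rw [PySem.Chars.isIn_eq_false_iff] at hb ⊢
        intro hinf; exact hb ((infix_dd_cons c t hd).mp hinf)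
      · rw [PySem.Chars.isIn_iff_infix] at hb ⊢
        exact List.infix_cons hb

theorem length_rep2_le (l : List Char) : (rep2 l).length ≤ l.length := by
  induction l using rep2.induct with
  | case1 t ih => simp [rep2]; omega
  | case2 c t h ih =>
    rw [rep2_cons c t (by
      rintro ⟨a, b⟩
      cases t with
      | nil => simp at b
      | cons c2 t2 => simp at b; exact h t2 a (by rw [b]))]
    simp only [List.length_cons]
    omega
  | case3 => simp [rep2]

theorem length_rep2_lt (l : List Char) (h : hasDD l = true) : (rep2 l).length < l.length := by
  induction l using rep2.induct with
  | case1 t ih =>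
    simp only [rep2, List.length_cons]
    have := length_rep2_le t; omega
  | case2 c t h2 ih =>
    rw [rep2.eq_def]
    cases t with
    | nil => simp [hasDD] at h
    | cons c2 t2 =>
      have hne : ¬(c = ' ' ∧ c2 = ' ') := fun ⟨a, b⟩ => h2 t2 a (by rw [b])
      simp only [hasDD, Bool.or_eq_true, Bool.and_eq_true, beq_iff_eq] at h
      rcases h with h | h
      · exact absurd h hne
      · rcases Decidable.not_and_iff_not_or_not.mp hne with h1 | h1 <;>
          · simp only [List.length_cons]
            have := ih h
            simp only [List.length_cons] at this ⊢
            omega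
  | case3 => simp [hasDD] at h

-- the while-loop of A: while "  " in line: line = line.replace("  ", " ")
def rawLoopA (l : List Char) : List Char :=
  if PySem.Chars.isIn [' ', ' '] l then rawLoopA (PySem.Chars.replace l [' ', ' '] [' ']) else l
termination_by l.length
decreasing_by
  rw [replace_eq_rep2]
  exact length_rep2_lt l (by rwa [isIn_eq_hasDD] at *)

def delimsA : List Char := ['<', '>', '=', '?', '!', '/']

-- the for-loop body of A, over state (stripped_line, part)
def stepA (st : List (List Char) × List Char) (c : Char) : List (List Char) × List Char :=
  if delimsA.contains c then
    (st.1 ++ [PySem.Chars.stripChars st.2 [' '], [c]], [])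
  else
    (st.1, st.2 ++ [c])

def raw_line (line : String) : String :=
  String.ofList (PySem.Chars.join []
    (((rawLoopA line.toList).foldl stepA ([], [])).1 ++
      [PySem.Chars.stripChars ((rawLoopA line.toList).foldl stepA ([], [])).2 [' ']]))

-- ===== PORT B =====
def delimsB : List Char := "<>=?!/".toList

-- loop body of B over state (out, pending, boundary)
def stepB (st : List Char × Bool × Bool) (c : Char) : List Char × Bool × Bool :=
  if c == ' ' then (st.1, true, st.2.2)
  else if delimsB.contains c then (st.1 ++ [c], false, true)
  else ((st.1 ++ (if st.2.1 && !st.2.2 then [' '] else [])) ++ [c], false, false)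

def raw_line_alt (line : String) : String :=
  String.ofList (line.toList.foldl stepB ([], false, true)).1

-- ===== PRECONDITION & SPEC =====
def Spec_raw_line (line : String) (out : String) : Prop := out = raw_line_alt line
instance (line : String) (out : String) : Decidable (Spec_raw_line line out) := by unfold Spec_raw_line; infer_instance

-- ===== CLAIM (what is proved, stated in full; the proofs are below) =====
def Claim_equal_raw_line : Prop := ∀ (line : String), Dom_raw_line line → Spec_raw_line line (raw_line line)

-- ===== LEMMAS AND PROOFS =====

-- structural version of B's loop: output still to be produced from state (pending, boundary)
def bgo (p bd : Bool) : List Char → List Char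
  | [] => []
  | c :: t =>
    if c == ' ' then bgo true bd t
    else if delimsB.contains c then c :: bgo false true t
    else (if p && !bd then [' '] else []) ++ c :: bgo false false t

theorem foldB_eq (l : List Char) (out : List Char) (p bd : Bool) :
    (l.foldl stepB (out, p, bd)).1 = out ++ bgo p bd l := by
  induction l generalizing out p bd with
  | nil => simp [bgo]
  | cons c t ih =>
    simp only [List.foldl_cons, stepB, bgo]
    by_cases h1 : c == ' '
    · simp [h1, ih]
    · by_cases h2 : c ∈ delimsB <;> simp [h1, h2, List.contains_eq_mem, ih]

-- structural version of A's for-loop: remaining output given accumulated part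
def ago (part : List Char) : List Char → List Char
  | [] => PySem.Chars.stripChars part [' ']
  | c :: t =>
    if delimsA.contains c then
      PySem.Chars.stripChars part [' '] ++ c :: ago [] t
    else ago (part ++ [c]) t

theorem join_nil_flatten (parts : List (List Char)) :
    PySem.Chars.join [] parts = parts.flatten := by
  induction parts with
  | nil => simp [PySem.Chars.join, List.intercalate]
  | cons x xs ih =>
    simp only [PySem.Chars.join, List.intercalate] at *
    cases xs <;> simp_all

theorem foldA_eq (l : List Char) (stripped : List (List Char)) (part : List Char) :
    PySem.Chars.join [] ((l.foldl stepA (stripped, part)).1 ++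
      [PySem.Chars.stripChars (l.foldl stepA (stripped, part)).2 [' ']]) =
    stripped.flatten ++ ago part l := by
  induction l generalizing stripped part with
  | nil => simp [ago, join_nil_flatten]
  | cons c t ih =>
    simp only [List.foldl_cons, stepA, ago]
    by_cases h : c ∈ delimsA
    · simp only [List.contains_eq_mem, h, decide_true, if_true]
      rw [ih]; simp
    · simp only [List.contains_eq_mem, h, decide_false, Bool.false_eq_true, if_false]
      rw [ih]

-- B's value is invariant under one replace("  ", " ") pass
theorem bgo_rep2 (l : List Char) (p bd : Bool) : bgo p bd (rep2 l) = bgo p bd l := by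
  induction l using rep2.induct generalizing p bd with
  | case1 t ih => simp [rep2, bgo, ih]
  | case2 c t h ih =>
    rw [rep2_cons c t (by
      rintro ⟨a, b⟩
      cases t with
      | nil => simp at b
      | cons c2 t2 => simp at b; exact h t2 a (by rw [b]))]
    simp only [bgo]
    by_cases hc : c = ' '
    · simp [hc, ih]
    · by_cases h2 : c ∈ delimsB <;> simp [hc, h2, List.contains_eq_mem, ih]
  | case3 => simp [rep2]

-- no-double-space transfers along suffixes (via the infix characterization)
theorem hasDD_iff_infix (l : List Char) : hasDD l = true ↔ [' ', ' '] <:+: l := by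
  rw [← isIn_eq_hasDD]; exact PySem.Chars.isIn_iff_infix _ _

theorem hasDD_false_of_infix {l l' : List Char} (h : l' <:+: l) (hl : hasDD l = false) :
    hasDD l' = false := by
  rcases hb : hasDD l' with _ | _
  · rfl
  · rw [hasDD_iff_infix] at hb
    have := (hasDD_iff_infix l).mpr (hb.trans h)
    rw [hl] at this; cases this

-- state abbreviations for the main invariant
def pendOf (part : List Char) : Bool := part.getLast? == some ' '
def allsp (part : List Char) : Bool := part.all (· == ' ')

theorem stripChars_eq (s : List Char) :
    PySem.Chars.stripChars s [' '] =
      List.rdropWhile (fun c => [' '].contains c) (List.dropWhile (fun c => [' '].contains c) s) := by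
  simp [PySem.Chars.stripChars, List.rdropWhile]

theorem strip_append_space (s : List Char) :
    PySem.Chars.stripChars (s ++ [' ']) [' '] = PySem.Chars.stripChars s [' '] := by
  rw [stripChars_eq, stripChars_eq, List.dropWhile_append]
  by_cases he : (List.dropWhile (fun c => [' '].contains c) s).isEmpty
  · rw [if_pos he]
    rw [List.isEmpty_iff] at he
    rw [he]
    simp [List.dropWhile, List.rdropWhile]
  · rw [if_neg he, List.rdropWhile_concat, if_pos (by simp)]

-- the crux: appending a non-space char to a run-free part commutes with stripping,
-- re-introducing the single withheld trailing space exactly when B's flags say so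
theorem strip_append_char (s : List Char) (c : Char) (hc : ¬ c = ' ')
    (h : hasDD s = false) :
    PySem.Chars.stripChars (s ++ [c]) [' '] =
      PySem.Chars.stripChars s [' '] ++ (if pendOf s && !allsp s then [' '] else []) ++ [c] := by
  have hpc : ([' '].contains c) = false := by simp [hc]
  rw [stripChars_eq, stripChars_eq, List.dropWhile_append]
  by_cases he : (List.dropWhile (fun c => [' '].contains c) s).isEmpty
  · rw [if_pos he]
    rw [List.isEmpty_iff] at he
    have hall : allsp s = true := by
      rw [List.dropWhile_eq_nil_iff] at he
      simp only [allsp, List.all_eq_true]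
      intro x hx
      simpa using he x hx
    rw [he]
    simp [List.dropWhile, List.rdropWhile, hall, hc]
  · rw [if_neg he]
    set d := List.dropWhile (fun c => [' '].contains c) s with hd
    have hdne : d ≠ [] := by simpa [List.isEmpty_iff] using he
    have hall : allsp s = false := by
      rcases hb : allsp s with _ | _
      · rfl
      · exfalso
        apply hdne
        rw [hd, List.dropWhile_eq_nil_iff]
        intro x hx
        simp only [allsp, List.all_eq_true] at hb
        simpa using hb x hx
    have hsuff : d <:+ s := List.dropWhile_suffix _
    have hlast : s.getLast? = d.getLast? := by
      rcases hsuff with ⟨pre, hpre⟩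
      rw [← hpre, List.getLast?_append_of_ne_nil pre hdne]
    rw [List.rdropWhile_concat, if_neg (by simpa using hc)]
    by_cases hp : pendOf s
    · -- part ends with a single space: stripping removes it, the flag re-adds it
      have hld : d.getLast? = some ' ' := by
        rw [← hlast]
        simpa [pendOf] using hp
      have hgl : d.getLast hdne = ' ' := by
        rw [List.getLast?_eq_some_getLast hdne] at hld
        injection hld
      have hdd : d = d.dropLast ++ [' '] := by
        conv_lhs => rw [← List.dropLast_append_getLast hdne]
        rw [hgl]
      have hhead : ([' '].contains (d.head hdne)) = false :=
        List.head_dropWhile_not _ hdne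
      have hdlne : d.dropLast ≠ [] := by
        intro h0
        have hsingle : d = [' '] := by rw [hdd, h0]; rfl
        have hh : d.head hdne = ' ' := by
          have h2 := congrArg List.head? hsingle
          rw [List.head?_eq_some_head hdne] at h2
          injection h2
        rw [hh] at hhead
        simp at hhead
      have hgl2 : ∀ (h2 : d.dropLast ≠ []), d.dropLast.getLast h2 ≠ ' ' := by
        intro h2 hsp
        -- otherwise s ends in two spaces, contradicting hasDD s = false
        have : [' ', ' '] <:+ d := by
          conv_rhs => rw [hdd]
          conv_rhs => rw [← List.dropLast_append_getLast h2]
          rw [hsp, List.append_assoc]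
          exact (List.suffix_append _ _)
        have hdd2 : hasDD d = false := hasDD_false_of_infix hsuff.isInfix h
        have := (hasDD_iff_infix d).mpr this.isInfix
        rw [hdd2] at this
        cases this
      have hstr : List.rdropWhile (fun c => [' '].contains c) d = d.dropLast := by
        conv_lhs => rw [hdd]
        rw [List.rdropWhile_concat, if_pos (by simp)]
        rw [List.rdropWhile_eq_self_iff]
        intro hl
        simpa using hgl2 hl
      rw [hstr, hp, hall]
      simp only [Bool.not_false, Bool.and_true, if_pos]
      conv_lhs => rw [hdd]

    · -- part does not end with a space: stripping is the identity on the right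
      have hld : ∀ (h2 : d ≠ []), d.getLast h2 ≠ ' ' := by
        intro h2 hsp
        apply hp
        simp only [pendOf, hlast, List.getLast?_eq_some_getLast h2, hsp]
        rfl
      have hstr : List.rdropWhile (fun c => [' '].contains c) d = d := by
        rw [List.rdropWhile_eq_self_iff]
        intro hl
        simpa using hld hl
      rw [hstr]
      rcases hb : pendOf s with _ | _
      · simp
      · rw [hb] at hp; cases hp rfl

theorem main_inv (rest part : List Char) (h : hasDD (part ++ rest) = false) :
    ago part rest = PySem.Chars.stripChars part [' '] ++ bgo (pendOf part) (allsp part) rest := by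
  induction rest generalizing part with
  | nil => simp [ago, bgo]
  | cons c t ih =>
    have hpt : hasDD ((part ++ [c]) ++ t) = false := by
      rw [List.append_assoc]; simpa using h
    simp only [ago, bgo]
    by_cases hdel : c ∈ delimsA
    · have hc : ¬ c = ' ' := by
        simp only [delimsA, List.mem_cons, List.not_mem_nil, or_false] at hdel
        rcases hdel with rfl | rfl | rfl | rfl | rfl | rfl <;> simp
      have hdelB : c ∈ delimsB := by
        have : delimsB = delimsA := by decide
        rw [this]; exact hdel
      have ht : hasDD t = false :=
        hasDD_false_of_infix ((List.suffix_cons c t).trans (List.suffix_append part (c :: t))).isInfix h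
      have h0 : ago [] t = bgo false true t := by
        have := ih [] (by simpa using ht)
        simpa [PySem.Chars.stripChars, pendOf, allsp] using this
      simp [List.contains_eq_mem, hdel, hdelB, hc, h0]
    · by_cases hc : c = ' '
      · subst hc
        have hsp : (' ' : Char) ∉ delimsA := by decide
        rw [if_neg (by simp [List.contains_eq_mem, hsp]), ih _ hpt]
        rw [strip_append_space]
        have h1 : pendOf (part ++ [' ']) = true := by simp [pendOf]
        have h2 : allsp (part ++ [' ']) = allsp part := by simp [allsp]
        rw [h1, h2]
        simp
      · have hdelB : ¬ c ∈ delimsB := by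
          have : delimsB = delimsA := by decide
          rw [this]; exact hdel
        rw [if_neg (by simp [List.contains_eq_mem, hdel]), ih _ hpt]
        have hpart : hasDD part = false :=
          hasDD_false_of_infix (List.prefix_append part (c :: t)).isInfix h
        have h1 : pendOf (part ++ [c]) = false := by
          simp [pendOf, hc]
        have h2 : allsp (part ++ [c]) = false := by simp [allsp, hc]
        rw [h1, h2, strip_append_char part c hc hpart]
        simp [hc, hdelB]

theorem rawLoopA_props (l : List Char) :
    (∀ p bd, bgo p bd (rawLoopA l) = bgo p bd l) ∧ hasDD (rawLoopA l) = false := by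
  induction l using rawLoopA.induct with
  | case1 l hin ih =>
    rw [rawLoopA, if_pos hin]
    refine ⟨fun p bd => ?_, ih.2⟩
    rw [ih.1 p bd, replace_eq_rep2, bgo_rep2]
  | case2 l hin =>
    rw [rawLoopA, if_neg hin]
    refine ⟨fun _ _ => rfl, ?_⟩
    rw [← isIn_eq_hasDD]
    exact Bool.of_not_eq_true hin

-- ===== VERDICT (by name: the statement is the Claim_ definition above) =====
theorem raw_line_spec : Claim_equal_raw_line := by
  intro line _
  unfold Spec_raw_line raw_line raw_line_alt
  congr 1
  rw [foldA_eq, foldB_eq]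
  simp only [List.flatten_nil, List.nil_append]
  rw [main_inv _ [] (rawLoopA_props line.toList).2]
  simp only [PySem.Chars.stripChars, List.dropWhile_nil, List.reverse_nil, List.nil_append]
  exact (rawLoopA_props line.toList).1 (pendOf []) (allsp [])
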